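-- pv_equiv track=rewrite | github.com/megamino81/coding_test | python/etc/jadencase.py | solution
-- ===== SOURCE A (Python) =====
-- def solution(s):
--   answer = ''
--   words = s.split(" ")
--   result = []
--
--   for w in words:
--     if w != "":
--       result.append(w[0].upper() + w[1:].lower())
--     else:
--       result.append("")
--   answer = " ".join(result)
--
--   return answer
-- ===== SOURCE B (Python) =====
-- def solution(s):
--   out = []
--   new_word = True
--   for c in s:
--     if c == ' ':
--       out.append(c)
--       new_word = True
--     elif new_word:
--       out.append(c.upper())
--       new_word = False
--     else:
--       out.append(c.lower())
--   return ''.join(out)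
-- ===== Notes on version B (the rewrite author's own statement) =====
-- stated objective: alternative
-- what changed: Replaces split-on-space / per-word capitalize / join with a single character-by-character scan carrying a new_word flag, never building a word list.
import Mathlib
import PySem

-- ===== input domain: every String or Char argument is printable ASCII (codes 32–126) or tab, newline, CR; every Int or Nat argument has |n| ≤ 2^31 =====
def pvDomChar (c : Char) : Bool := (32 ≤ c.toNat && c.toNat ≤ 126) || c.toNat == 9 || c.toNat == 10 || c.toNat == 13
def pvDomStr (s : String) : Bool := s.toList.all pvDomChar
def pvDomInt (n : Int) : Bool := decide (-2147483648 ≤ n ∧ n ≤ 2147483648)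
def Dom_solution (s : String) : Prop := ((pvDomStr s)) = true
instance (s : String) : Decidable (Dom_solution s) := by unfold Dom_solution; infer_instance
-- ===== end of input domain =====

-- B replaces split/capitalize/join with a single char scan carrying a new_word flag (alternative decomposition, same cost).

-- ===== PORT A =====
def solution (s : String) : String :=
  let words := PySem.Chars.splitOn s.toList [' ']
  let result : List (List Char) := words.foldl (fun r w =>
    if w ≠ [] then
      r ++ [(match PySem.List.pyGet? w 0 with
             | some c => [PySem.Chars.upperChar c]
             | none => []) ++ PySem.Chars.lower (PySem.List.slice w (some 1) none)]
    else r ++ [[]]) []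
  String.ofList (PySem.Chars.join [' '] result)

-- ===== PORT B =====
def solution_alt (s : String) : String :=
  let st := s.toList.foldl (fun (st : List Char × Bool) c =>
    if c = ' ' then (st.1 ++ [c], true)
    else if st.2 then (st.1 ++ [PySem.Chars.upperChar c], false)
    else (st.1 ++ [PySem.Chars.lowerChar c], false)) ([], true)
  String.ofList st.1

-- ===== PRECONDITION & SPEC =====
def Spec_solution (s : String) (out : String) : Prop := out = solution_alt s
instance (s : String) (out : String) : Decidable (Spec_solution s out) := by unfold Spec_solution; infer_instance

-- ===== CLAIM (what is proved, stated in full; the proofs are below) =====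
def Claim_equal_solution : Prop := ∀ (s : String), Dom_solution s → Spec_solution s (solution s)

-- ===== LEMMAS AND PROOFS =====

-- simple recursive characterisation of splitting on a single space
def sp : List Char → List (List Char)
  | [] => [[]]
  | c :: cs => if c = ' ' then [] :: sp cs
               else match sp cs with
                    | [] => [[c]]
                    | w :: ws => (c :: w) :: ws

theorem sp_ne_nil (cs : List Char) : sp cs ≠ [] := by
  cases cs with
  | nil => simp [sp]
  | cons c cs =>
    simp only [sp]
    split
    · simp
    · split <;> simp

def consH (p : List Char) : List (List Char) → List (List Char)
  | [] => [p]
  | w :: ws => (p ++ w) :: ws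

theorem consH_nil_of_ne_nil {l : List (List Char)} (h : l ≠ []) : consH [] l = l := by
  cases l with
  | nil => exact absurd rfl h
  | cons w ws => simp [consH]

theorem go_eq (fuel : Nat) (cs cur : List Char) (hacc : List (List Char))
    (h : cs.length < fuel) :
    PySem.Chars.splitOn.go [' '] fuel cs cur hacc = hacc.reverse ++ consH cur.reverse (sp cs) := by
  induction fuel generalizing cs cur hacc with
  | zero => omega
  | succ f ih =>
    cases cs with
    | nil => simp [PySem.Chars.splitOn.go, sp, consH]
    | cons c rest =>
      have hf : rest.length < f := by simpa using h
      rw [PySem.Chars.splitOn.go]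
      by_cases hc : c = ' '
      · simp only [hc, List.isPrefixOf, BEq.rfl, Bool.true_and, if_pos,
          List.length_cons, List.length_nil]
        rw [show List.drop (0 + 1) (' ' :: rest) = rest from rfl]
        rw [ih rest [] (cur.reverse :: hacc) hf]
        rw [List.reverse_nil, consH_nil_of_ne_nil (sp_ne_nil rest)]
        rcases hsp : sp rest with _ | ⟨w, ws⟩
        · exact absurd hsp (sp_ne_nil rest)
        · simp [sp, hsp, consH]
      · have hpre : [' '].isPrefixOf (c :: rest) = false := by
          simpa [List.isPrefixOf] using fun h => hc h.symm
        simp only [hpre, if_neg, Bool.false_eq_true, not_false_eq_true]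
        rw [ih rest (c :: cur) hacc hf]
        rcases hsp : sp rest with _ | ⟨w, ws⟩
        · exact absurd hsp (sp_ne_nil rest)
        · simp [sp, hsp, hc, consH]

theorem splitOn_eq_sp (cs : List Char) : PySem.Chars.splitOn cs [' '] = sp cs := by
  rw [PySem.Chars.splitOn, go_eq (cs.length + 1) cs [] [] (by omega)]
  simp [consH_nil_of_ne_nil (sp_ne_nil cs)]

-- capitalisation of one word as A computes it
def capB : List Char → List Char
  | [] => []
  | c :: r => PySem.Chars.upperChar c :: PySem.Chars.lower r

-- junction of capitalised words, recursively
def J : List (List Char) → List Char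
  | [] => []
  | [w] => capB w
  | w :: ws => capB w ++ ' ' :: J ws

theorem J_eq_join (l : List (List Char)) :
    J l = PySem.Chars.join [' '] (l.map capB) := by
  induction l with
  | nil => simp [J, PySem.Chars.join_nil]
  | cons w ws ih =>
    cases ws with
    | nil => simp [J, PySem.Chars.join_singleton]
    | cons v vs =>
      simp only [List.map_cons] at ih ⊢
      rw [PySem.Chars.join_cons_cons,
        show J (w :: v :: vs) = capB w ++ ' ' :: J (v :: vs) from rfl, ← ih]
      simp

-- tail of a cap chain when the current word has already started
def T : List (List Char) → List Char
  | [] => []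
  | [w] => PySem.Chars.lower w
  | w :: ws => PySem.Chars.lower w ++ ' ' :: J ws

def go2 : Bool → List Char → List Char
  | _, [] => []
  | nw, c :: cs =>
    if c = ' ' then ' ' :: go2 true cs
    else (if nw then PySem.Chars.upperChar c else PySem.Chars.lowerChar c) :: go2 false cs

theorem go2_eq (cs : List Char) :
    go2 true cs = J (sp cs) ∧ go2 false cs = T (sp cs) := by
  induction cs with
  | nil => exact ⟨by simp [go2, sp, J, capB], by simp [go2, sp, T, PySem.Chars.lower]⟩
  | cons c cs ih =>
    obtain ⟨ih1, ih2⟩ := ih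
    rcases hsp : sp cs with _ | ⟨w, ws⟩
    · exact absurd hsp (sp_ne_nil cs)
    · by_cases hc : c = ' '
      · constructor <;>
          simp [go2, sp, hc, hsp, J, T, capB, ih1, PySem.Chars.lower]
      · cases ws with
        | nil =>
          constructor <;>
            simp [go2, sp, hc, hsp, J, T, capB, ih2, PySem.Chars.lower]
        | cons v vs =>
          constructor <;>
            simp [go2, sp, hc, hsp, J, T, capB, ih2, PySem.Chars.lower]

theorem foldlB (cs : List Char) (buf : List Char) (nw : Bool) :
    (cs.foldl (fun (st : List Char × Bool) c =>
      if c = ' ' then (st.1 ++ [c], true)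
      else if st.2 then (st.1 ++ [PySem.Chars.upperChar c], false)
      else (st.1 ++ [PySem.Chars.lowerChar c], false)) (buf, nw)).1 = buf ++ go2 nw cs := by
  induction cs generalizing buf nw with
  | nil => simp [go2]
  | cons c cs ih => by_cases h : c = ' ' <;> cases nw <;> simp [go2, h, ih]

theorem foldlA (ws : List (List Char)) (r : List (List Char)) (g : List Char → List Char) :
    ws.foldl (fun r w => if w ≠ [] then r ++ [g w] else r ++ [[]]) r
      = r ++ ws.map (fun w => if w ≠ [] then g w else []) := by
  induction ws generalizing r with
  | nil => simp
  | cons w ws ih =>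
    simp only [List.foldl_cons, List.map_cons]
    rw [show (if w ≠ [] then r ++ [g w] else r ++ [[]])
          = r ++ [if w ≠ [] then g w else []] from by split <;> rfl]
    rw [ih]; simp

theorem capA_eq_capB (w : List Char) :
    (if w ≠ [] then
      (match PySem.List.pyGet? w 0 with
       | some c => [PySem.Chars.upperChar c]
       | none => []) ++ PySem.Chars.lower (PySem.List.slice w (some 1) none)
     else []) = capB w := by
  cases w with
  | nil => simp [capB]
  | cons c r => simp [capB, PySem.List.pyGet?, PySem.List.pyIdx?, PySem.List.slice_from_one, PySem.Chars.lower]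

-- ===== VERDICT (by name: the statement is the Claim_ definition above) =====
theorem solution_spec : Claim_equal_solution := by
  intro s _
  simp only [Spec_solution, solution, solution_alt]
  rw [foldlB, foldlA, splitOn_eq_sp, (go2_eq s.toList).1, J_eq_join]
  simp only [capA_eq_capB, List.nil_append]
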